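-- pv_equiv track=rewrite | github.com/Doseeey/spoj-rozwiazania | spacja.py | zmiana
-- ===== SOURCE A (Python) =====
-- def zmiana(x):
--     x[0] = str(x[0]).capitalize()
--     for i in range(x.count(' ')):
--         ind = x.index(' ')
--         if ind+1 < len(x):
--             x[ind+1] = str(x[ind+1]).capitalize()
--         x.remove(' ')
--     return x
-- ===== SOURCE B (Python) =====
-- def zmiana(x):
--     out = []
--     cap = True
--     for e in x:
--         if e == ' ':
--             cap = True
--         else:
--             out.append(str(e).capitalize() if cap else e)
--             cap = False
--     x[:] = out
--     return x
-- ===== Notes on version B (the rewrite author's own statement) =====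
-- stated objective: alternative
-- what changed: A repeatedly calls count/index/remove (a rescan plus a tail shift per space); B makes a single left-to-right pass with a 'capitalize the next kept element' flag and rebuilds the list once.
import Mathlib
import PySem

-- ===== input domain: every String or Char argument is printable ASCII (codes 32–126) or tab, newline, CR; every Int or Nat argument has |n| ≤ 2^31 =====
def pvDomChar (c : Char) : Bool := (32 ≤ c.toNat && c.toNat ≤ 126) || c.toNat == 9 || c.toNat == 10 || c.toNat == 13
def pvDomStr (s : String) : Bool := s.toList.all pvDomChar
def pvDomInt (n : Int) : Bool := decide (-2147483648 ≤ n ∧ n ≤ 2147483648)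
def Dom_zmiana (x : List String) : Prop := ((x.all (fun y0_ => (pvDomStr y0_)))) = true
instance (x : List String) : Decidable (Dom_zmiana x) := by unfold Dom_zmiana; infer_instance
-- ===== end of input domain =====

-- B replaces A's count/index/remove loop by a single left-to-right pass with a "capitalize next kept element" flag;
-- both A and B mutate the argument list in place (the theorems are about the returned value).

-- ===== PORT A =====
-- str.capitalize (exact on the ASCII domain: first char uppercased, the rest lowercased)
def capChars : List Char → List Char
  | [] => []
  | c :: r => PySem.Chars.upperChar c :: r.map PySem.Chars.lowerChar

def capPy (s : String) : String := String.ofList (capChars s.toList)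

-- one iteration of A's loop body: find the first ' ', capitalize the element after it (if any), remove the ' '
def stepA (y : List String) : List String :=
  match PySem.List.index? y " " with
  | none => y  -- unreachable when the loop runs: the loop runs exactly count-many times
  | some ind =>
    let y1 := if ind + 1 < y.length then y.set (ind + 1) (capPy (y.getD (ind + 1) "")) else y
    (PySem.List.remove? y1 " ").getD y1

def zmiana (x : List String) : List String :=
  match x with
  | [] => []  -- Python raises IndexError at x[0] here; excluded by Pre_zmiana
  | h :: t =>
    let x0 := capPy h :: t
    (List.range (PySem.List.count x0 " ")).foldl (fun y _ => stepA y) x0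

-- ===== PORT B =====
def zmiana_alt (x : List String) : List String :=
  (x.foldl (fun (st : List String × Bool) e =>
      if e = " " then (st.1, true)
      else (st.1 ++ [if st.2 then capPy e else e], false))
    ([], true)).1

-- ===== PRECONDITION & SPEC =====
-- Pre_ excludes only the empty list, on which Python A raises IndexError at x[0].
def Pre_zmiana (x : List String) : Prop := x ≠ []
instance (x : List String) : Decidable (Pre_zmiana x) := by unfold Pre_zmiana; infer_instance
def pvWitness_zmiana : List String := ["ab", " ", "cD"]

def Spec_zmiana (x : List String) (out : List String) : Prop := out = zmiana_alt x
instance (x : List String) (out : List String) : Decidable (Spec_zmiana x out) := by unfold Spec_zmiana; infer_instance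

-- ===== CLAIM (what is proved, stated in full; the proofs are below) =====
def Claim_equal_zmiana : Prop := ∀ (x : List String), Dom_zmiana x → Pre_zmiana x → Spec_zmiana x (zmiana x)

-- ===== LEMMAS AND PROOFS =====

theorem char_le_iff (a b : Char) : a ≤ b ↔ a.toNat ≤ b.toNat := by
  rw [Char.le_def]; exact Iff.symm UInt32.le_iff_toNat_le

theorem upper_upper (c : Char) :
    PySem.Chars.upperChar (PySem.Chars.upperChar c) = PySem.Chars.upperChar c := by
  simp only [PySem.Chars.upperChar, PySem.Chars.islower]
  split_ifs with h1 h2 <;> try rfl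
  exfalso
  simp only [Bool.and_eq_true, decide_eq_true_eq, char_le_iff] at h1 h2
  have ha : ('a' : Char).toNat = 97 := rfl
  have hz : ('z' : Char).toNat = 122 := rfl
  rw [ha, hz] at h1 h2
  have hv : (Char.ofNat (c.toNat - 32)).toNat = c.toNat - 32 := by
    rw [Char.toNat_ofNat, if_pos]
    unfold Nat.isValidChar; omega
  omega

theorem lower_lower (c : Char) :
    PySem.Chars.lowerChar (PySem.Chars.lowerChar c) = PySem.Chars.lowerChar c := by
  simp only [PySem.Chars.lowerChar, PySem.Chars.isupper]
  split_ifs with h1 h2 <;> try rfl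
  exfalso
  simp only [Bool.and_eq_true, decide_eq_true_eq, char_le_iff] at h1 h2
  have ha : ('A' : Char).toNat = 65 := rfl
  have hz : ('Z' : Char).toNat = 90 := rfl
  rw [ha, hz] at h1 h2
  have hb : c.toNat < 55296 := by
    have h3 := h1.2
    omega
  have hv : (Char.ofNat (c.toNat + 32)).toNat = c.toNat + 32 := by
    rw [Char.toNat_ofNat, if_pos]
    unfold Nat.isValidChar; omega
  omega

theorem upper_eq_space_iff (c : Char) :
    PySem.Chars.upperChar c = ' ' ↔ c = ' ' := by
  simp only [PySem.Chars.upperChar, PySem.Chars.islower]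
  split_ifs with h1
  · simp only [Bool.and_eq_true, decide_eq_true_eq, char_le_iff] at h1
    have ha : ('a' : Char).toNat = 97 := rfl
    have hz : ('z' : Char).toNat = 122 := rfl
    rw [ha, hz] at h1
    have hv : (Char.ofNat (c.toNat - 32)).toNat = c.toNat - 32 := by
      rw [Char.toNat_ofNat, if_pos]
      unfold Nat.isValidChar; omega
    constructor
    · intro h
      exfalso
      have := congrArg Char.toNat h
      rw [hv] at this
      have hsp : (' ' : Char).toNat = 32 := rfl
      omega
    · intro h; subst h; exfalso
      have hsp : (' ' : Char).toNat = 32 := rfl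
      omega
  · exact Iff.rfl

theorem cap_cap (l : List Char) : capChars (capChars l) = capChars l := by
  cases l with
  | nil => rfl
  | cons c r =>
    simp only [capChars, upper_upper, List.map_map, List.cons.injEq, true_and]
    exact List.map_congr_left (fun d _ => lower_lower d)

theorem capPy_idem (s : String) : capPy (capPy s) = capPy s := by
  unfold capPy
  rw [String.toList_ofList, cap_cap]

theorem capPy_space : capPy " " = " " := by decide

theorem capPy_eq_space_iff (s : String) : capPy s = " " ↔ s = " " := by
  constructor
  · intro h
    have h' : (capPy s).toList = " ".toList := by rw [h]
    unfold capPy at h'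
    rw [String.toList_ofList] at h'
    cases hs : s.toList with
    | nil => rw [hs] at h'; simp [capChars] at h'
    | cons c r =>
      rw [hs] at h'
      simp only [capChars] at h'
      have hsp : (" " : String).toList = [' '] := rfl
      rw [hsp] at h'
      have hc : PySem.Chars.upperChar c = ' ' ∧ r.map PySem.Chars.lowerChar = [] := by
        constructor
        · exact (List.cons.injEq _ _ _ _ ▸ h').1
        · exact (List.cons.injEq _ _ _ _ ▸ h').2
      have hcsp : c = ' ' := (upper_eq_space_iff c).mp hc.1
      have hr : r = [] := by
        have := hc.2
        cases r with
        | nil => rfl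
        | cons _ _ => simp at this
      apply String.toList_inj.mp
      rw [hs, hcsp, hr]; rfl
  · intro h; subst h; exact capPy_space

-- B's pass as a structural recursion
def run : List String → Bool → List String
  | [], _ => []
  | e :: t, cap =>
    if e = " " then run t true
    else (if cap then capPy e else e) :: run t false

theorem alt_foldl (l : List String) (acc : List String) (c : Bool) :
    (l.foldl (fun (st : List String × Bool) e =>
      if e = " " then (st.1, true)
      else (st.1 ++ [if st.2 then capPy e else e], false)) (acc, c)).1
    = acc ++ run l c := by
  induction l generalizing acc c with
  | nil => simp [run]
  | cons e t ih =>
    simp only [List.foldl_cons, run]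
    by_cases h : e = " "
    · simp [h, ih]
    · simp [h, ih]

theorem zmiana_alt_eq_run (x : List String) : zmiana_alt x = run x true := by
  unfold zmiana_alt
  simpa using alt_foldl x [] true

-- the head of a list after A's step: capitalize it
def capHead : List String → List String
  | [] => []
  | w :: v => capPy w :: v

theorem remove?_append_space (u v : List String) (hu : " " ∉ u) :
    PySem.List.remove? (u ++ " " :: v) " " = some (u ++ v) := by
  induction u with
  | nil => simp [PySem.List.remove?_cons_self]
  | cons e u' ih =>
    have he : e ≠ " " := fun h => hu (h ▸ List.mem_cons_self)
    have hu' : " " ∉ u' := fun h => hu (List.mem_cons_of_mem _ h)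
    rw [List.cons_append, PySem.List.remove?_cons_of_ne _ he, ih hu']
    rfl

theorem stepA_decomp (u v : List String) (hu : " " ∉ u) :
    stepA (u ++ " " :: v) = u ++ capHead v := by
  have hidx : PySem.List.index? (u ++ " " :: v) " " = some u.length := by
    rw [PySem.List.index?_eq_some_iff]
    exact ⟨u, v, rfl, rfl, hu⟩
  unfold stepA
  rw [hidx]
  cases v with
  | nil =>
    have hlen : ¬ (u.length + 1 < (u ++ [" "]).length) := by
      simp
    simp only [hlen, if_false]
    rw [remove?_append_space u [] hu]
    rfl
  | cons w v' =>
    have hlen : u.length + 1 < (u ++ " " :: w :: v').length := by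
      simp
    simp only [hlen, if_true]
    have hget : (u ++ " " :: w :: v').getD (u.length + 1) "" = w := by
      unfold List.getD
      rw [List.getElem?_append_right (by omega)]
      simp
    have hset : (u ++ " " :: w :: v').set (u.length + 1) (capPy w) = u ++ " " :: capPy w :: v' := by
      rw [List.set_append, if_neg (by omega)]
      simp
    rw [hget, hset, remove?_append_space u (capPy w :: v') hu]
    rfl

theorem count_capHead (v : List String) : (capHead v).count " " = v.count " " := by
  cases v with
  | nil => rfl
  | cons w v' =>
    simp only [capHead, List.count_cons]
    by_cases hw : w = " "
    · subst hw; rw [capPy_space]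
    · have : capPy w ≠ " " := fun h => hw ((capPy_eq_space_iff w).mp h)
      simp [hw, this]

theorem count_stepA (u v : List String) (_hu : " " ∉ u) :
    (u ++ " " :: v).count " " = (u ++ capHead v).count " " + 1 := by
  rw [List.count_append, List.count_append, List.count_cons_self, count_capHead]
  omega

theorem run_capHead (u v : List String) (c : Bool) (hu : " " ∉ u) :
    run (u ++ capHead v) c = run (u ++ " " :: v) c := by
  induction u generalizing c with
  | nil =>
    cases v with
    | nil => rfl
    | cons w v' =>
      simp only [List.nil_append, capHead, run]
      by_cases hw : w = " "
      · subst hw; rw [capPy_space]; simp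
      · have hcw : capPy w ≠ " " := fun h => hw ((capPy_eq_space_iff w).mp h)
        simp only [hw, hcw, if_false]
        cases c <;> simp [capPy_idem]
  | cons e u' ih =>
    have he : e ≠ " " := fun h => hu (h ▸ List.mem_cons_self)
    have hu' : " " ∉ u' := fun h => hu (List.mem_cons_of_mem _ h)
    simp only [List.cons_append, run, he, if_false]
    rw [ih _ hu']

-- the loop never changes the (idempotently capitalized) head
def HeadCap : List String → Prop
  | [] => True
  | h :: _ => capPy h = h

theorem headCap_decomp (u v : List String) (h : HeadCap (u ++ " " :: v)) :
    HeadCap (u ++ capHead v) := by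
  cases u with
  | cons e u' => exact h
  | nil =>
    cases v with
    | nil => trivial
    | cons w v' => exact capPy_idem w

theorem run_noSpace_false (y : List String) (h : " " ∉ y) : run y false = y := by
  induction y with
  | nil => rfl
  | cons e t ih =>
    have he : e ≠ " " := fun hh => h (hh ▸ List.mem_cons_self)
    have ht : " " ∉ t := fun hh => h (List.mem_cons_of_mem _ hh)
    simp [run, he, ih ht]

theorem run_noSpace_true (y : List String) (h : " " ∉ y) (hc : HeadCap y) :
    run y true = y := by
  cases y with
  | nil => rfl
  | cons e t =>
    have he : e ≠ " " := fun hh => h (hh ▸ List.mem_cons_self)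
    have ht : " " ∉ t := fun hh => h (List.mem_cons_of_mem _ hh)
    simp only [run, he, if_false, if_true]
    rw [run_noSpace_false t ht]
    exact congrArg (· :: t) hc

theorem range_foldl_succ {α : Type} (f : α → α) (n : Nat) (x : α) :
    (List.range (n + 1)).foldl (fun y _ => f y) x
      = (List.range n).foldl (fun y _ => f y) (f x) := by
  rw [List.range_succ_eq_map]
  simp [List.foldl_map]

theorem iter_eq : ∀ (n : Nat) (x : List String), x.count " " = n → HeadCap x →
    (List.range n).foldl (fun y _ => stepA y) x = run x true := by
  intro n
  induction n with
  | zero =>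
    intro x hn hc
    have hmem : " " ∉ x := List.count_eq_zero.mp hn
    simpa using (run_noSpace_true x hmem hc).symm
  | succ m ih =>
    intro x hn hc
    have hmem : " " ∈ x := by
      by_contra hno
      rw [List.count_eq_zero.mpr hno] at hn
      omega
    obtain ⟨k, hk⟩ : ∃ k, PySem.List.index? x " " = some k := by
      rcases Option.eq_none_or_eq_some (PySem.List.index? x " ") with h | h
      · exfalso; exact (PySem.List.index?_eq_none_iff x " ").mp h hmem
      · exact h
    obtain ⟨u, v, hx, _, hu⟩ := (PySem.List.index?_eq_some_iff x " " k).mp hk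
    subst hx
    rw [range_foldl_succ, stepA_decomp u v hu]
    have hcount : (u ++ capHead v).count " " = m := by
      have := count_stepA u v hu
      omega
    rw [ih _ hcount (headCap_decomp u v hc)]
    exact run_capHead u v true hu

theorem run_capPy_head (h : String) (t : List String) :
    run (capPy h :: t) true = run (h :: t) true := by
  by_cases hh : h = " "
  · subst hh; rw [capPy_space]
  · have hch : capPy h ≠ " " := fun hx => hh ((capPy_eq_space_iff h).mp hx)
    simp [run, hh, hch, capPy_idem]

-- ===== VERDICT (by name: the statement is the Claim_ definition above) =====
theorem zmiana_spec : Claim_equal_zmiana := by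
  intro x _ hpre
  unfold Spec_zmiana
  cases x with
  | nil => exact absurd rfl hpre
  | cons h t =>
    show zmiana (h :: t) = zmiana_alt (h :: t)
    rw [zmiana_alt_eq_run]
    show (List.range (PySem.List.count (capPy h :: t) " ")).foldl (fun y _ => stepA y) (capPy h :: t) = run (h :: t) true
    rw [PySem.List.count_eq]
    rw [iter_eq (List.count " " (capPy h :: t)) (capPy h :: t) rfl (capPy_idem h)]
    exact run_capPy_head h t
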